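-- pv_equiv track=rewrite | github.com/Recursion0210/codeforces_practice | 1-100/1B-Spreadsheet-python3.py | change1
-- ===== SOURCE A (Python) =====
-- def change1(col):
--     K = []
--     while(col > 0):
--         yu = col % 26
--         if yu == 0:
--             col = col - 1
--             K.append(26)
--         else:
--             K.append(yu)
--         col = (col // 26)
--     K.reverse()
--     return K
-- ===== SOURCE B (Python) =====
-- def change1(col):
--     if col <= 0:
--         return []
--     q, r = divmod(col - 1, 26)
--     return change1(q) + [r + 1]
-- ===== Notes on version B (the rewrite author's own statement) =====
-- stated objective: simpler
-- what changed: Replaces the LSB-first while-loop with conditional decrement plus final reverse by a short MSB-first recursion on divmod(col-1, 26), emitting digits in final order with no branch and no reverse.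
import Mathlib
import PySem

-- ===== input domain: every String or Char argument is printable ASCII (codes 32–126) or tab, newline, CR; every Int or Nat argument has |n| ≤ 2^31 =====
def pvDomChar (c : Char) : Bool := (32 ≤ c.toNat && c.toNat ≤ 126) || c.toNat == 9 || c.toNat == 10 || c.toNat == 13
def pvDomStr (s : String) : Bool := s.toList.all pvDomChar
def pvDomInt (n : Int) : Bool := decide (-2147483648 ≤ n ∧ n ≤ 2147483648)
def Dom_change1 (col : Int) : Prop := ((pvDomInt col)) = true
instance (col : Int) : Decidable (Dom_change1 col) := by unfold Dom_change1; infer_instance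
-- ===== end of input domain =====

-- B replaces A's LSB-first loop (conditional decrement + final reverse) by an MSB-first
-- recursion on divmod(col-1, 26); objective: simpler.

-- ===== PORT A =====
-- the while loop: K accumulates digits LSB-first
def change1Loop (col : Int) (K : List Int) : List Int :=
  if 0 < col then
    let yu := PySem.Int.mod col 26
    if yu = 0 then
      change1Loop (PySem.Int.floordiv (col - 1) 26) (K ++ [26])
    else
      change1Loop (PySem.Int.floordiv col 26) (K ++ [yu])
  else K
termination_by col.toNat
decreasing_by
  all_goals
    rw [PySem.Int.floordiv_eq_ediv_of_pos (by omega : (0:Int) < 26)]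
    omega

def change1 (col : Int) : List Int := (change1Loop col []).reverse

-- ===== PORT B =====
def change1_alt (col : Int) : List Int :=
  if col ≤ 0 then []
  else change1_alt (PySem.Int.floordiv (col - 1) 26) ++ [PySem.Int.mod (col - 1) 26 + 1]
termination_by col.toNat
decreasing_by
  rw [PySem.Int.floordiv_eq_ediv_of_pos (by omega : (0:Int) < 26)]
  omega

-- ===== PRECONDITION & SPEC =====
def Spec_change1 (col : Int) (out : List Int) : Prop := out = change1_alt col
instance (col : Int) (out : List Int) : Decidable (Spec_change1 col out) := by unfold Spec_change1; infer_instance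

-- ===== CLAIM (what is proved, stated in full; the proofs are below) =====
def Claim_equal_change1 : Prop := ∀ (col : Int), Dom_change1 col → Spec_change1 col (change1 col)

-- ===== LEMMAS AND PROOFS =====

-- loop invariant: the loop appends B's digit list, reversed, to the accumulator
theorem change1Loop_eq (n : Nat) (col : Int) (hn : col.toNat = n) (K : List Int) :
    change1Loop col K = K ++ (change1_alt col).reverse := by
  induction n using Nat.strong_induction_on generalizing col K with
  | _ n ih =>
    rw [change1Loop, change1_alt]
    by_cases hpos : 0 < col
    · have h26 : (0:Int) < 26 := by omega
      rw [PySem.Int.mod_eq_emod_of_pos h26, PySem.Int.floordiv_eq_ediv_of_pos h26,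
        PySem.Int.floordiv_eq_ediv_of_pos h26] at *
      simp only [hpos, if_true]
      by_cases hz : col % 26 = 0
      · simp only [hz, if_true]
        rw [ih ((col - 1) / 26).toNat (by omega) _ rfl]
        have hd : (col - 1) % 26 + 1 = 26 := by omega
        rw [if_neg (by omega : ¬ col ≤ 0)]
        simp
        omega
      · simp only [hz, if_false]
        rw [ih (col / 26).toNat (by omega) _ rfl]
        have hq : col / 26 = (col - 1) / 26 := by omega
        have hd : col % 26 = (col - 1) % 26 + 1 := by omega
        rw [if_neg (by omega : ¬ col ≤ 0)]
        simp
        exact ⟨hd, by rw [hq]⟩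
    · simp [(by omega : ¬ 0 < col), (by omega : col ≤ 0)]

-- ===== VERDICT (by name: the statement is the Claim_ definition above) =====
theorem change1_spec : Claim_equal_change1 := by
  intro col _
  unfold Spec_change1 change1
  rw [change1Loop_eq col.toNat col rfl []]
  simp
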